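-- pv_equiv track=rewrite | github.com/isabella232/linux-intel-quilt | tools/patch_tool.py | get_date_stamp
-- ===== SOURCE A (Python) =====
-- def get_date_stamp(patch):
--     lines = patch.splitlines(keepends=True)
--     date_line = ""
--     for line in lines:
--         if line == '---\n':
--             break
--         if line.find("Date:") == 0:
--             date_line = line
--
--     return date_line
-- ===== SOURCE B (Python) =====
-- def split_first_line(s):
--     i = 0
--     while i < len(s) and s[i] not in '\r\n':
--         i += 1
--     if i < len(s):
--         i += 2 if s[i:i+2] == '\r\n' else 1
--     return s[:i], s[i:]
--
--
-- def get_date_stamp(patch):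
--     stack = []
--     s = patch
--     while s:
--         line, s = split_first_line(s)
--         if line == '---\n':
--             break
--         stack.append(line)
--     while stack:
--         line = stack.pop()
--         if line.startswith('Date:'):
--             return line
--     return ''
-- ===== Notes on version B (the rewrite author's own statement) =====
-- stated objective: alternative
-- what changed: B drops splitlines entirely: a hand-written streaming line splitter peels one line at a time and stops at the '---' delimiter, pushing lines on a stack, then a second loop pops from the end and returns the first line starting with 'Date:', instead of A's splitlines + forward scan with a running accumulator.
import Mathlib
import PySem

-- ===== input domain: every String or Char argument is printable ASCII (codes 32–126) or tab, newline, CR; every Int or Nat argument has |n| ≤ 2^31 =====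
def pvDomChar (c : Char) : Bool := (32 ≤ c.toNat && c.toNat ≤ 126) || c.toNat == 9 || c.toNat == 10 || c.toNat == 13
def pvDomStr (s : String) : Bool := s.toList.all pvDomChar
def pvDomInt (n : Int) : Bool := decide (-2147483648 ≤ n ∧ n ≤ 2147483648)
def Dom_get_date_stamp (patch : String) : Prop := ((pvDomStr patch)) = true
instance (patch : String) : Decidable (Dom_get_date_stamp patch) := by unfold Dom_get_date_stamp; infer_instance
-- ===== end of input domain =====

-- B replaces A's splitlines + forward accumulator loop by a streaming line splitter that stops
-- at the '---' delimiter, a stack of the lines seen, and a pop-scan from the end (alternative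
-- decomposition, same O(n) cost).

-- ===== PORT A =====
-- A's patch.splitlines(keepends=True) (exact for \n, \r, \r\n — the only line ends in Dom)
def pvSplitKeep (cs : List Char) (cur : List Char) : List String :=
  match cs with
  | [] => if cur = [] then [] else [String.ofList cur.reverse]
  | '\r' :: '\n' :: rest => String.ofList (cur.reverse ++ ['\r', '\n']) :: pvSplitKeep rest []
  | '\r' :: rest => String.ofList (cur.reverse ++ ['\r']) :: pvSplitKeep rest []
  | '\n' :: rest => String.ofList (cur.reverse ++ ['\n']) :: pvSplitKeep rest []
  | c :: rest => pvSplitKeep rest (c :: cur)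
  termination_by cs.length
  decreasing_by all_goals (simp; try omega)

-- A's loop: break at '---\n', remember the last line with find("Date:") == 0
def pvLoopA : List String → String → String
  | [], acc => acc
  | l :: rest, acc =>
    if l = "---\n" then acc
    else if PySem.Str.find l "Date:" = 0 then pvLoopA rest l
    else pvLoopA rest acc

def get_date_stamp (patch : String) : String :=
  pvLoopA (pvSplitKeep patch.toList []) ""

-- ===== PORT B =====
-- Source B's split_first_line inner while loop: index i scanned past non-terminator chars
def pvScanB : List Char → Nat
  | [] => 0
  | c :: rest => if c = '\r' ∨ c = '\n' then 0 else pvScanB rest + 1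

-- Source B's split_first_line: (s[:i], s[i:]) with the terminator folded into the first part
def pvSplitFirst (s : List Char) : List Char × List Char :=
  let i := pvScanB s
  let i := if i < s.length then (if (s.drop i).take 2 = ['\r', '\n'] then i + 2 else i + 1) else i
  (s.take i, s.drop i)

theorem pvSplitFirst_snd_lt (s : List Char) (h : s ≠ []) :
    (pvSplitFirst s).2.length < s.length := by
  have hlen : 0 < s.length := List.length_pos_of_ne_nil h
  unfold pvSplitFirst
  simp only
  split_ifs <;> simp only [List.length_drop] <;> omega

-- Source B's first while loop: consume lines until the string is empty or the '---' delimiter line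
def pvBuild (s : List Char) : List (List Char) :=
  if h : s = [] then []
  else
    let p := pvSplitFirst s
    if p.1 = ['-', '-', '-', '\n'] then [] else p.1 :: pvBuild p.2
  termination_by s.length
  decreasing_by exact pvSplitFirst_snd_lt s h

-- Source B's second while loop: pop lines from the end of the stack until one starts with 'Date:'
def pvPopScan (stack : List (List Char)) : List Char :=
  match h : stack.getLast? with
  | none => []
  | some line =>
    if PySem.Chars.startswith line "Date:".toList then line else pvPopScan stack.dropLast
  termination_by stack.length
  decreasing_by
    have : stack ≠ [] := by intro he; simp [he] at h
    simp [List.length_dropLast]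
    cases stack with
    | nil => exact absurd rfl this
    | cons a t => simp

def get_date_stamp_alt (patch : String) : String :=
  String.ofList (pvPopScan (pvBuild patch.toList))

-- ===== PRECONDITION & SPEC =====
def Spec_get_date_stamp (patch : String) (out : String) : Prop := out = get_date_stamp_alt patch
instance (patch : String) (out : String) : Decidable (Spec_get_date_stamp patch out) := by unfold Spec_get_date_stamp; infer_instance

-- ===== CLAIM (what is proved, stated in full; the proofs are below) =====
def Claim_equal_get_date_stamp : Prop := ∀ (patch : String), Dom_get_date_stamp patch → Spec_get_date_stamp patch (get_date_stamp patch)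

-- ===== LEMMAS AND PROOFS =====

theorem pvPopScan_eq_find (st : List (List Char)) :
    pvPopScan st
      = (st.reverse.find? (fun l => PySem.Chars.startswith l ['D', 'a', 't', 'e', ':'])).getD [] := by
  induction st using List.reverseRecOn with
  | nil => simp [pvPopScan]
  | append_singleton t l ih =>
    rw [pvPopScan]
    split
    · rename_i heq; simp at heq
    · rename_i line heq
      rw [List.getLast?_concat] at heq
      injection heq with heq
      subst heq
      rw [List.dropLast_concat]
      simp only [List.reverse_append, List.reverse_cons, List.reverse_nil, List.nil_append,
        List.cons_append, List.find?]
      by_cases hp : PySem.Chars.startswith l ['D', 'a', 't', 'e', ':'] = true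
      · simp [hp]
      · simp [hp, ih]
theorem pvSplitFirst_cr_lf (rest : List Char) :
    pvSplitFirst ('\r' :: '\n' :: rest) = (['\r', '\n'], rest) := by
  simp [pvSplitFirst, pvScanB]

theorem pvSplitFirst_lf (rest : List Char) :
    pvSplitFirst ('\n' :: rest) = (['\n'], rest) := by
  simp [pvSplitFirst, pvScanB]

theorem pvSplitFirst_cr (rest : List Char) (hne : ∀ r, rest ≠ '\n' :: r) :
    pvSplitFirst ('\r' :: rest) = (['\r'], rest) := by
  rcases rest with _ | ⟨c, r⟩
  · simp [pvSplitFirst, pvScanB]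
  · have hc : c ≠ '\n' := by intro hc; exact hne r (by rw [hc])
    simp [pvSplitFirst, pvScanB, hc]

theorem pvSplitFirst_cons (c : Char) (rest : List Char) (h1 : c ≠ '\r') (h2 : c ≠ '\n') :
    pvSplitFirst (c :: rest) = (c :: (pvSplitFirst rest).1, (pvSplitFirst rest).2) := by
  have hc : ¬(c = '\r' ∨ c = '\n') := by simp [h1, h2]
  simp only [pvSplitFirst, pvScanB, if_neg hc, List.length_cons, List.drop_succ_cons,
    List.take_succ_cons, Nat.add_lt_add_iff_right]
  split_ifs <;> simp_all [List.take_succ_cons, List.drop_succ_cons]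
theorem pvSplitKeep_decomp (s cur : List Char) :
    s ≠ [] →
    pvSplitKeep s cur
      = String.ofList (cur.reverse ++ (pvSplitFirst s).1) :: pvSplitKeep (pvSplitFirst s).2 [] := by
  induction s, cur using pvSplitKeep.induct with
  | case1 => intro h; exact absurd rfl h
  | case2 cur hcur => intro h; exact absurd rfl h
  | case3 cur rest ih =>
    intro _
    simp [pvSplitKeep, pvSplitFirst_cr_lf]
  | case4 cur rest hne ih =>
    intro _
    have hne' : ∀ r, rest ≠ '\n' :: r := fun r hr => hne r hr
    rcases rest with _ | ⟨c, r⟩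
    · simp [pvSplitKeep, pvSplitFirst_cr _ hne']
    · have hc : c ≠ '\n' := by intro hc; exact hne' r (by rw [hc])
      simp [pvSplitKeep, pvSplitFirst_cr _ hne', hc]
  | case5 cur rest ih =>
    intro _
    simp [pvSplitKeep, pvSplitFirst_lf]
  | case6 cur c rest h1 h2 h3 ih =>
    intro _
    have hr : c ≠ '\r' := fun hc => h2 hc
    have hn : c ≠ '\n' := fun hc => h3 hc
    rw [pvSplitFirst_cons c rest hr hn]
    rcases rest with _ | ⟨c', r⟩
    · -- s = [c] : pvSplitKeep [c] cur = pvSplitKeep [] (c::cur) = [ofList (cur.reverse ++ [c])]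
      simp [pvSplitKeep, pvSplitFirst]
    · have hrest : (c' :: r) ≠ [] := by simp
      rw [show pvSplitKeep (c :: c' :: r) cur = pvSplitKeep (c' :: r) (c :: cur) from by
        rw [pvSplitKeep.eq_def]
        split <;> simp_all]
      rw [ih hrest]
      simp


theorem find_zero_iff_startswith (l : String) :
    (PySem.Str.find l "Date:" = 0) ↔ PySem.Str.startswith l "Date:" = true := by
  rw [PySem.Str.startswith_eq, PySem.Chars.startswith_iff, PySem.Str.find_eq]
  constructor
  · intro h
    have hs := PySem.Chars.find_spec (s := l.toList) (sub := "Date:".toList) (le_of_eq h.symm)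
    rw [h] at hs
    simpa using hs.1
  · intro h
    have hne : PySem.Chars.find l.toList "Date:".toList ≠ -1 :=
      (PySem.Chars.find_ne_neg_one_iff _ _).mpr h.isInfix
    have hnn : 0 ≤ PySem.Chars.find l.toList "Date:".toList := by
      have := PySem.Chars.neg_one_le_find (s := l.toList) (sub := "Date:".toList); omega
    have hs := PySem.Chars.find_spec (s := l.toList) (sub := "Date:".toList) hnn
    by_contra hne0
    have h0 : (0 : Nat) < (PySem.Chars.find l.toList "Date:".toList).toNat := by omega
    exact hs.2 0 h0 (by simpa using h)


theorem startswith_ne_nil (l : List Char) (h : PySem.Chars.startswith l ['D', 'a', 't', 'e', ':'] = true) :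
    l ≠ [] := by
  intro he
  rw [he] at h
  exact absurd h (by decide)

theorem find_ofList_zero_iff (l : List Char) :
    (PySem.Str.find (String.ofList l) "Date:" = 0) ↔
      PySem.Chars.startswith l ['D', 'a', 't', 'e', ':'] = true := by
  rw [find_zero_iff_startswith, PySem.Str.startswith_eq]
  simp

theorem main_aux (n : Nat) : ∀ (s : List Char) (acc : String), s.length ≤ n →
    pvLoopA (pvSplitKeep s []) acc
      = (if pvPopScan (pvBuild s) = [] then acc
         else String.ofList (pvPopScan (pvBuild s))) := by
  induction n with
  | zero =>
    intro s acc hs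
    have hnil : s = [] := by cases s with
      | nil => rfl
      | cons a t => simp at hs
    subst hnil
    simp [pvSplitKeep, pvLoopA, pvBuild, pvPopScan]
  | succ n ih =>
    intro s acc hs
    rcases eq_or_ne s [] with rfl | hne
    · simp [pvSplitKeep, pvLoopA, pvBuild, pvPopScan]
    · have hlt := pvSplitFirst_snd_lt s hne
      have hlen : (pvSplitFirst s).2.length ≤ n := by omega
      rw [pvSplitKeep_decomp s [] hne, pvBuild, dif_neg hne]
      simp only [List.reverse_nil, List.nil_append]
      by_cases hdel : (pvSplitFirst s).1 = ['-', '-', '-', '\n']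
      · have hofl : String.ofList (pvSplitFirst s).1 = "---\n" := by rw [hdel]
        rw [if_pos hdel]
        simp [pvLoopA, hofl, pvPopScan]
      · have hofl : String.ofList (pvSplitFirst s).1 ≠ "---\n" := by
          intro hcontr
          apply hdel
          have := congrArg String.toList hcontr
          simpa using this
        simp only [if_neg hdel]
        by_cases hdate : PySem.Chars.startswith (pvSplitFirst s).1 ['D', 'a', 't', 'e', ':'] = true
        · have hfind : PySem.Str.find (String.ofList (pvSplitFirst s).1) "Date:" = 0 :=
            (find_ofList_zero_iff _).mpr hdate
          simp only [pvLoopA, if_neg hofl, if_pos hfind]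
          rw [ih _ _ hlen, pvPopScan_eq_find, pvPopScan_eq_find]
          rw [List.reverse_cons, List.find?_append]
          cases hf : (pvBuild (pvSplitFirst s).2).reverse.find?
              (fun l => PySem.Chars.startswith l ['D', 'a', 't', 'e', ':']) with
          | none =>
            simp [Option.or, List.find?, hdate, startswith_ne_nil _ hdate, hf]
          | some x =>
            have hx := List.find?_some hf
            simp only [] at hx
            simp [Option.or, List.find?, hdate, hf, startswith_ne_nil _ hx]
        · have hfind : ¬ PySem.Str.find (String.ofList (pvSplitFirst s).1) "Date:" = 0 := by
            intro hcontr; exact hdate ((find_ofList_zero_iff _).mp hcontr)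
          simp only [pvLoopA, if_neg hofl, if_neg hfind]
          rw [ih _ _ hlen, pvPopScan_eq_find, pvPopScan_eq_find]
          rw [List.reverse_cons, List.find?_append]
          have hd' : PySem.Chars.startswith (pvSplitFirst s).1 ['D', 'a', 't', 'e', ':'] = false :=
            Bool.eq_false_iff.mpr hdate
          cases hf : (pvBuild (pvSplitFirst s).2).reverse.find?
              (fun l => PySem.Chars.startswith l ['D', 'a', 't', 'e', ':']) <;>
            simp [List.find?, hd', Option.or, hf]

theorem main_lemma (s : List Char) (acc : String) :
    pvLoopA (pvSplitKeep s []) acc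
      = (if pvPopScan (pvBuild s) = [] then acc
         else String.ofList (pvPopScan (pvBuild s))) :=
  main_aux s.length s acc le_rfl

-- ===== VERDICT (by name: the statement is the Claim_ definition above) =====
theorem get_date_stamp_spec : Claim_equal_get_date_stamp := by
  intro patch _
  show get_date_stamp patch = get_date_stamp_alt patch
  unfold get_date_stamp get_date_stamp_alt
  rw [main_lemma]
  split_ifs with h <;> simp [h]
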